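-- pv_equiv track=rewrite | github.com/wangzizhe/GateForge | gateforge/agent_modelica_v0_9_5_common.py | dominant_barrier_family
-- ===== SOURCE A (Python) =====
-- def dominant_barrier_family(barrier_distribution: dict[str, int]) -> str:
--     if not barrier_distribution:
--         return "none"
--     ordered = sorted(
--         ((str(k), int(v)) for k, v in barrier_distribution.items()),
--         key=lambda item: (-item[1], item[0]),
--     )
--     if len(ordered) >= 2 and ordered[0][1] == ordered[1][1]:
--         return "mixed_non_success_barriers"
--     return ordered[0][0]
-- ===== SOURCE B (Python) =====
-- def dominant_barrier_family(barrier_distribution: dict[str, int]) -> str: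
--     best = None  # (value, key of an entry holding the current max value)
--     ties = 0     # how many entries carry the current max value
--     for k, v in barrier_distribution.items():
--         k, v = str(k), int(v)
--         if best is None or v > best[0]:
--             best = (v, k)
--             ties = 1
--         elif v == best[0]:
--             ties += 1
--     if best is None:
--         return "none"
--     if ties >= 2:
--         return "mixed_non_success_barriers"
--     return best[1]
-- ===== Notes on version B (the rewrite author's own statement) =====
-- stated objective: faster
-- what changed: Replaced the full sort by (-count, key) with a single linear pass that tracks the current maximum value, one key holding it, and how many entries hold it.
import Mathlib
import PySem

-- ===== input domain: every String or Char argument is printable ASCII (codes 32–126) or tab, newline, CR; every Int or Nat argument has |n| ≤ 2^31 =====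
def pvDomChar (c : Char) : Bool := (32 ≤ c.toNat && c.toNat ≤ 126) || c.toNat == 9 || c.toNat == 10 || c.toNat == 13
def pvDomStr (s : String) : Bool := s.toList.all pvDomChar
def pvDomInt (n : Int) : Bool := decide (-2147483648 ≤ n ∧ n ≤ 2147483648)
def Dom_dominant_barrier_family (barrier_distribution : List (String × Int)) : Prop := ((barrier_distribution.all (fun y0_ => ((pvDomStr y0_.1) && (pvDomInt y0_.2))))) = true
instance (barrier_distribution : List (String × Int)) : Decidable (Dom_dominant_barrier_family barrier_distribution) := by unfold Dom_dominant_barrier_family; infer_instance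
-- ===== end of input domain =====

-- B is a single linear pass (max value, a key holding it, its multiplicity) replacing A's sort; return values proved equal.

-- ===== PORT A =====
-- the Python sort key (-item[1], item[0]) compared lexicographically
def dbfKey (item : String × Int) : Lex (Int × String) := toLex (-item.2, item.1)

def dominant_barrier_family (barrier_distribution : List (String × Int)) : String :=
  if barrier_distribution = [] then "none"
  else
    let ordered := PySem.List.sorted barrier_distribution dbfKey
    if 2 ≤ PySem.List.len ordered ∧
        (PySem.List.pyGetD ordered 0 ("", 0)).2 = (PySem.List.pyGetD ordered 1 ("", 0)).2 then
      "mixed_non_success_barriers"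
    else (PySem.List.pyGetD ordered 0 ("", 0)).1

-- ===== PORT B =====
-- loop body of Source B: state = (best as (value, key), ties)
def dbfStep (s : Option (Int × String) × Int) (kv : String × Int) : Option (Int × String) × Int :=
  match s with
  | (none, _) => (some (kv.2, kv.1), 1)
  | (some (m, bk), c) =>
    if kv.2 > m then (some (kv.2, kv.1), 1)
    else if kv.2 = m then (some (m, bk), c + 1)
    else (some (m, bk), c)

def dominant_barrier_family_alt (barrier_distribution : List (String × Int)) : String :=
  match barrier_distribution.foldl dbfStep (none, 0) with
  | (none, _) => "none"
  | (some (_, bk), c) => if 2 ≤ c then "mixed_non_success_barriers" else bk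

-- ===== PRECONDITION & SPEC =====
def Spec_dominant_barrier_family (barrier_distribution : List (String × Int)) (out : String) : Prop := out = dominant_barrier_family_alt barrier_distribution
instance (barrier_distribution : List (String × Int)) (out : String) : Decidable (Spec_dominant_barrier_family barrier_distribution out) := by unfold Spec_dominant_barrier_family; infer_instance

-- ===== CLAIM (what is proved, stated in full; the proofs are below) =====
def Claim_equal_dominant_barrier_family : Prop := ∀ (barrier_distribution : List (String × Int)), Dom_dominant_barrier_family barrier_distribution → Spec_dominant_barrier_family barrier_distribution (dominant_barrier_family barrier_distribution)

-- ===== LEMMAS AND PROOFS =====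

-- a lex-key comparison bounds the value component
theorem dbfKey_le_snd {p q : String × Int} (h : dbfKey p ≤ dbfKey q) : q.2 ≤ p.2 := by
  rcases (Prod.Lex.toLex_le_toLex).mp h with h | ⟨h, _⟩ <;> omega

-- invariant of B's fold once the state is `some`
theorem dbf_fold_inv (l : List (String × Int)) : ∀ (m : Int) (k : String) (c : Int),
    ∃ m' k' c', l.foldl dbfStep (some (m, k), c) = (some (m', k'), c') ∧
      ((k' = k ∧ m' = m) ∨ (k', m') ∈ l) ∧ m ≤ m' ∧ (∀ kv ∈ l, kv.2 ≤ m') ∧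
      c' = (if m' = m then c else 0) + (l.countP (fun kv => decide (kv.2 = m')) : Int) := by
  induction l with
  | nil =>
    intro m k c
    exact ⟨m, k, c, rfl, Or.inl ⟨rfl, rfl⟩, le_refl _, by simp, by simp⟩
  | cons kv l ih =>
    intro m k c
    by_cases h1 : kv.2 > m
    · obtain ⟨m', k', c', hfold, hmem, hle, hbd, hc⟩ := ih kv.2 kv.1 1
      refine ⟨m', k', c', ?_, ?_, ?_, ?_, ?_⟩
      · simpa [dbfStep, h1] using hfold
      · right
        rcases hmem with ⟨hk, hm⟩ | h
        · have : (k', m') = kv := by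
            cases kv; simp_all
          rw [this]; exact List.mem_cons_self
        · exact List.mem_cons_of_mem _ h
      · omega
      · intro y hy
        rcases List.mem_cons.mp hy with rfl | hy
        · exact hle
        · exact hbd y hy
      · have hne : m' ≠ m := by omega
        rw [List.countP_cons]
        by_cases h2 : m' = kv.2 <;> simp [h2, hne] at hc ⊢ <;> omega
    · by_cases h2 : kv.2 = m
      · obtain ⟨m', k', c', hfold, hmem, hle, hbd, hc⟩ := ih m k (c + 1)
        refine ⟨m', k', c', ?_, Or.imp_right (List.mem_cons_of_mem _) hmem, hle, ?_, ?_⟩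
        · simpa [dbfStep, h1, h2] using hfold
        · intro y hy
          rcases List.mem_cons.mp hy with rfl | hy
          · omega
          · exact hbd y hy
        · rw [List.countP_cons]
          by_cases h3 : m' = m
          · simp [h3, h2] at hc ⊢; omega
          · have h4 : ¬ m = m' := fun h => h3 h.symm
            simp [h3, h2, h4] at hc ⊢; omega
      · obtain ⟨m', k', c', hfold, hmem, hle, hbd, hc⟩ := ih m k c
        refine ⟨m', k', c', ?_, Or.imp_right (List.mem_cons_of_mem _) hmem, hle, ?_, ?_⟩
        · simpa [dbfStep, h1, h2] using hfold
        · intro y hy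
          rcases List.mem_cons.mp hy with rfl | hy
          · omega
          · exact hbd y hy
        · rw [List.countP_cons]
          have h4 : ¬ kv.2 = m' := by omega
          simp [h4] at hc ⊢; omega

-- two distinct members satisfying p force countP ≥ 2
theorem countP_ge_two {l : List (String × Int)} {p : String × Int → Bool} {u v : String × Int}
    (hu : u ∈ l) (hv : v ∈ l) (hne : u ≠ v) (hpu : p u = true) (hpv : p v = true) :
    2 ≤ l.countP p := by
  have hperm := List.perm_cons_erase hu
  have hv' : v ∈ l.erase u := (List.mem_erase_of_ne (Ne.symm hne)).mpr hv
  have h1 : 0 < (l.erase u).countP p := List.countP_pos_iff.mpr ⟨v, hv', hpv⟩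
  have h2 : l.countP p = (u :: l.erase u).countP p := hperm.countP_eq p
  have h3 : (u :: l.erase u).countP p = (l.erase u).countP p + 1 := by
    rw [List.countP_cons, hpu]; simp
  omega

theorem dbf_main (bd : List (String × Int)) :
    dominant_barrier_family bd = dominant_barrier_family_alt bd := by
  cases bd with
  | nil => rfl
  | cons x t =>
    have hsne : PySem.List.sorted (x :: t) dbfKey ≠ [] := by
      simp [PySem.List.sorted_eq_nil_iff]
    obtain ⟨a, rest, hs⟩ := List.exists_cons_of_ne_nil hsne
    have hperm : (PySem.List.sorted (x :: t) dbfKey).Perm (x :: t) :=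
      PySem.List.sorted_perm (x :: t) dbfKey false
    have hmaxa : ∀ y ∈ x :: t, dbfKey a ≤ dbfKey y :=
      PySem.List.key_head_sorted_le (x :: t) dbfKey hs
    have hbound : ∀ y ∈ x :: t, y.2 ≤ a.2 := fun y hy => dbfKey_le_snd (hmaxa y hy)
    have hamem : a ∈ x :: t := hperm.mem_iff.mp (by rw [hs]; exact List.mem_cons_self)
    -- B side
    obtain ⟨m', k', c', hfold, hmem, hle, hbd2, hc⟩ := dbf_fold_inv t x.2 x.1 1
    have hfold' : (x :: t).foldl dbfStep (none, 0) = (some (m', k'), c') := by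
      simpa [dbfStep] using hfold
    have hm'mem : (k', m') ∈ x :: t := by
      rcases hmem with ⟨hk, hm⟩ | h
      · have : (k', m') = x := by cases x; simp_all
        rw [this]; exact List.mem_cons_self
      · exact List.mem_cons_of_mem _ h
    have hm'max : ∀ y ∈ x :: t, y.2 ≤ m' := by
      intro y hy
      rcases List.mem_cons.mp hy with rfl | hy
      · exact hle
      · exact hbd2 y hy
    have hm'a : m' = a.2 := le_antisymm (hbound _ hm'mem) (hm'max a hamem)
    have hcnt : c' = ((x :: t).countP (fun kv => decide (kv.2 = a.2)) : Int) := by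
      rw [List.countP_cons]
      subst hm'a
      by_cases h2 : x.2 = a.2 <;>
        simp [h2, show (a.2 = x.2) ↔ (x.2 = a.2) from eq_comm] at hc ⊢ <;> omega
    cases rest with
    | nil =>
      have hsingle : x :: t = [a] := List.perm_singleton.mp (hs ▸ hperm.symm)
      have hx : x = a ∧ t = [] := by
        constructor <;> [exact (List.cons_eq_cons.mp hsingle).1; exact (List.cons_eq_cons.mp hsingle).2]
      obtain ⟨rfl, rfl⟩ := hx
      simp only [dominant_barrier_family, dominant_barrier_family_alt]
      rw [if_neg (by simp)]
      simp only [hs, PySem.List.len_eq]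
      rw [if_neg (by simp)]
      have hf : ([x].foldl dbfStep (none, 0)) = (some (x.2, x.1), 1) := by simp [dbfStep]
      rw [hf]
      simp [PySem.List.pyGetD_zero_cons]
    | cons b r2 =>
      have hpw := PySem.List.sorted_pairwise (x :: t) dbfKey
      rw [hs] at hpw
      have hab : dbfKey a ≤ dbfKey b := (List.pairwise_cons.mp hpw).1 b List.mem_cons_self
      have hbz : ∀ z ∈ r2, dbfKey b ≤ dbfKey z :=
        (List.pairwise_cons.mp (List.pairwise_cons.mp hpw).2).1
      have hbmem : b ∈ x :: t := hperm.mem_iff.mp (by rw [hs]; simp)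
      have hget0 : PySem.List.pyGetD (a :: b :: r2) (0 : Int) (("", 0) : String × Int) = a :=
        PySem.List.pyGetD_zero_cons a (b :: r2) ("", 0)
      have hget1 : PySem.List.pyGetD (a :: b :: r2) (1 : Int) (("", 0) : String × Int) = b := by
        have h1 : ((1 : Nat) : Int) = (1 : Int) := by norm_num
        rw [← h1, PySem.List.pyGetD_natCast]
        rfl
      simp only [dominant_barrier_family, dominant_barrier_family_alt]
      rw [if_neg (by simp)]
      simp only [hs, PySem.List.len_eq, hget0, hget1, hfold']
      by_cases habv : a.2 = b.2
      · -- tie for max: both return "mixed_non_success_barriers"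
        rw [if_pos ⟨by push_cast [List.length_cons]; omega, habv⟩]
        have hp := hperm.countP_eq (fun kv => decide (kv.2 = a.2))
        rw [hs] at hp
        have hcab : (a :: b :: r2).countP (fun kv => decide (kv.2 = a.2))
            = ((b :: r2).countP (fun kv => decide (kv.2 = a.2))) + 1 := by
          rw [List.countP_cons]; simp
        have hcb : ((b :: r2).countP (fun kv => decide (kv.2 = a.2)))
            = (r2.countP (fun kv => decide (kv.2 = a.2))) + 1 := by
          rw [List.countP_cons]; simp [habv.symm]
        rw [if_pos (by omega)]
      · rw [if_neg (by rintro ⟨-, h⟩; exact habv h)]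
        -- the max value occurs exactly once
        have hzero : ∀ z ∈ b :: r2, ¬ z.2 = a.2 := by
          intro z hz
          have hzle : z.2 ≤ b.2 := by
            rcases List.mem_cons.mp hz with rfl | hz
            · exact le_refl _
            · exact dbfKey_le_snd (hbz z hz)
          have hble : b.2 ≤ a.2 := hbound b hbmem
          intro he
          exact habv (by omega)
        have hcount1 : (x :: t).countP (fun kv => decide (kv.2 = a.2)) = 1 := by
          have := hperm.countP_eq (fun kv => decide (kv.2 = a.2))
          rw [hs] at this
          rw [← this, List.countP_cons]
          have h0 : (b :: r2).countP (fun kv => decide (kv.2 = a.2)) = 0 := by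
            rw [List.countP_eq_zero]
            intro z hz
            simpa using hzero z hz
          simp [h0]
        rw [if_neg (by omega)]
        -- B's kept key is the key of the unique max entry, i.e. a.1
        have huniq : (k', m') = a := by
          by_contra hne
          have h2 := countP_ge_two hm'mem hamem hne
            (p := fun kv => decide (kv.2 = a.2)) (by simp [hm'a]) (by simp)
          omega
        have : k' = a.1 := by rw [← huniq]
        rw [this]

-- ===== VERDICT (by name: the statement is the Claim_ definition above) =====
theorem dominant_barrier_family_spec : Claim_equal_dominant_barrier_family := by
  intro bd _
  unfold Spec_dominant_barrier_family
  exact dbf_main bd
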